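-- pv_equiv track=rewrite | github.com/LongWeeeeeee/bets | base/test_filters.py | is_early_match_stable4k_3min
-- ===== SOURCE A (Python) =====
-- from typing import Tuple, Optional, Dict, Any
--
-- def is_early_match_stable4k_3min(match: Dict) -> Tuple[bool, Optional[str]]:
--     """Stable lead >= 4k минимум 3 минуты подряд на 15-30."""
--     leads = match.get('radiantNetworthLeads', [])
--     duration = len(leads)
--
--     if duration < 30 or duration > 50:
--         return False, None
--
--     consecutive_r = 0
--     consecutive_d = 0
--
--     for i in range(15, min(30, duration)):
--         if leads[i] >= 4000:
--             consecutive_r += 1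
--             consecutive_d = 0
--             if consecutive_r >= 3:
--                 return True, 'radiant'
--         elif leads[i] <= -4000:
--             consecutive_d += 1
--             consecutive_r = 0
--             if consecutive_d >= 3:
--                 return True, 'dire'
--         else:
--             consecutive_r = 0
--             consecutive_d = 0
--
--     return False, None
-- ===== SOURCE B (Python) =====
-- def is_early_match_stable4k_3min(match):
--     """Stable lead >= 4k for at least 3 consecutive minutes within 15-30."""
--     leads = match.get('radiantNetworthLeads', [])
--     if not (30 <= len(leads) <= 50):
--         return False, None
--     cats = ['radiant' if v >= 4000 else 'dire' if v <= -4000 else None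
--             for v in leads[15:30]]
--     i = 0
--     while i < len(cats):
--         j = i + 1
--         while j < len(cats) and cats[j] == cats[i]:
--             j += 1
--         if cats[i] is not None and j - i >= 3:
--             return True, cats[i]
--         i = j
--     return False, None
-- ===== Notes on version B (the rewrite author's own statement) =====
-- stated objective: alternative
-- what changed: Replaced the two-counter streak automaton with a categorize-then-group pass: map minutes 15-30 to 'radiant'/'dire'/None and scan maximal runs of equal category, returning on the first non-None run of length >= 3.
import Mathlib
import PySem

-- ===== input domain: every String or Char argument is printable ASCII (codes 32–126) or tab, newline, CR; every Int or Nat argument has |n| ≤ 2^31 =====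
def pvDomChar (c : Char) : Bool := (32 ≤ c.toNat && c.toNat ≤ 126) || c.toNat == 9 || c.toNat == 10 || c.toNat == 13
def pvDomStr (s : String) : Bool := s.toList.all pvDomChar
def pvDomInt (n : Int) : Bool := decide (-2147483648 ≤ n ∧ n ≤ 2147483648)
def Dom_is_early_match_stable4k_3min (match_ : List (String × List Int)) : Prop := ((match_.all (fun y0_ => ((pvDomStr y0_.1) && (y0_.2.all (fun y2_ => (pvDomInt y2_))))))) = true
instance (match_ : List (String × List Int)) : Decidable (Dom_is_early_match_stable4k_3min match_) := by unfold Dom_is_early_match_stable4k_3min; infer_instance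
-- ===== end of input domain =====

-- ===== PORT A =====
-- B replaces A's two-counter streak automaton by a categorize-then-scan over maximal runs (alternative decomposition, same cost).

-- A's for-loop over range(15, min(30, duration)) with the two streak counters and early returns.
-- leads[i] is in range whenever this loop runs (duration >= 30), so pyGetD's default is never used.
def pvLoopA (leads : List Int) : List Int → Int → Int → Bool × Option String
  | [], _, _ => (false, none)
  | i :: rest, cr, cd =>
    let v := PySem.List.pyGetD leads i 0
    if v ≥ 4000 then
      if cr + 1 ≥ 3 then (true, some "radiant") else pvLoopA leads rest (cr + 1) 0
    else if v ≤ -4000 then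
      if cd + 1 ≥ 3 then (true, some "dire") else pvLoopA leads rest 0 (cd + 1)
    else pvLoopA leads rest 0 0

def is_early_match_stable4k_3min (match_ : List (String × List Int)) : Bool × Option String :=
  let leads := PySem.Dict.getD ⟨match_⟩ "radiantNetworthLeads" []
  let duration : Int := leads.length
  if duration < 30 ∨ duration > 50 then (false, none)
  else pvLoopA leads (PySem.List.pyRange 15 (min 30 duration) 1) 0 0

-- ===== PORT B =====
def pvCat (v : Int) : Option String :=
  if v ≥ 4000 then some "radiant" else if v ≤ -4000 then some "dire" else none

-- B's while-loop over maximal runs of equal category (i advances to the end of each run).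
def pvScanB : List (Option String) → Bool × Option String
  | [] => (false, none)
  | c :: rest =>
    let j := (rest.takeWhile (fun x => x == c)).length
    if c.isSome ∧ j + 1 ≥ 3 then (true, c)
    else pvScanB (rest.drop j)
termination_by cs => cs.length
decreasing_by simp

def is_early_match_stable4k_3min_alt (match_ : List (String × List Int)) : Bool × Option String :=
  let leads := PySem.Dict.getD ⟨match_⟩ "radiantNetworthLeads" []
  if ¬ (30 ≤ (leads.length : Int) ∧ (leads.length : Int) ≤ 50) then (false, none)
  else pvScanB ((PySem.List.slice leads (some 15) (some 30)).map pvCat)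

-- ===== PRECONDITION & SPEC =====
def Spec_is_early_match_stable4k_3min (match_ : List (String × List Int)) (out : Bool × Option String) : Prop := out = is_early_match_stable4k_3min_alt match_
instance (match_ : List (String × List Int)) (out : Bool × Option String) : Decidable (Spec_is_early_match_stable4k_3min match_ out) := by unfold Spec_is_early_match_stable4k_3min; infer_instance

-- ===== CLAIM (what is proved, stated in full; the proofs are below) =====
def Claim_equal_is_early_match_stable4k_3min : Prop := ∀ (match_ : List (String × List Int)), Dom_is_early_match_stable4k_3min match_ → Spec_is_early_match_stable4k_3min match_ (is_early_match_stable4k_3min match_)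

-- ===== LEMMAS AND PROOFS =====

-- A's loop re-expressed over the window's VALUES (proof-only helper; the bridge lemma links it to pvLoopA).
def pvLoopV : List Int → Int → Int → Bool × Option String
  | [], _, _ => (false, none)
  | v :: rest, cr, cd =>
    if v ≥ 4000 then
      if cr + 1 ≥ 3 then (true, some "radiant") else pvLoopV rest (cr + 1) 0
    else if v ≤ -4000 then
      if cd + 1 ≥ 3 then (true, some "dire") else pvLoopV rest 0 (cd + 1)
    else pvLoopV rest 0 0

theorem pvScanB_cons (c : Option String) (rest : List (Option String)) :
    pvScanB (c :: rest) =
      if c.isSome ∧ (rest.takeWhile (fun x => x == c)).length + 1 ≥ 3 then (true, c)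
      else pvScanB (rest.drop (rest.takeWhile (fun x => x == c)).length) := by
  rw [pvScanB.eq_def]

theorem pvScanB_none (cs : List (Option String)) : pvScanB (none :: cs) = pvScanB cs := by
  cases cs with
  | nil => rw [pvScanB_cons]; simp
  | cons c cs' =>
    cases c with
    | none => rw [pvScanB_cons, pvScanB_cons]; simp
    | some c => rw [pvScanB_cons]; simp

theorem pvScanB_three (c : Option String) (cs : List (Option String)) (h : c.isSome) :
    pvScanB (c :: c :: c :: cs) = (true, c) := by
  rw [pvScanB_cons]
  simp only [List.takeWhile_cons, beq_self_eq_true, if_true]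
  rw [if_pos ⟨h, by simp⟩]

theorem pvScanB_skip1 (c c' : Option String) (cs : List (Option String)) (h : c' ≠ c) :
    pvScanB (c :: c' :: cs) = pvScanB (c' :: cs) := by
  rw [pvScanB_cons]
  simp [h]

theorem pvScanB_skip2 (c c' : Option String) (cs : List (Option String)) (h : c' ≠ c) :
    pvScanB (c :: c :: c' :: cs) = pvScanB (c' :: cs) := by
  rw [pvScanB_cons]
  simp [h]

-- The heart of the equivalence: A's streak automaton with a pending streak of k equal categories
-- computes what B's run scan computes on the window prefixed by those k categories.
theorem pvLoopV_eq_scan (w : List Int) : ∀ k : Nat, k ≤ 2 →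
    (pvLoopV w (k : Int) 0 = pvScanB (List.replicate k (some "radiant") ++ w.map pvCat)) ∧
    (pvLoopV w 0 (k : Int) = pvScanB (List.replicate k (some "dire") ++ w.map pvCat)) := by
  induction w with
  | nil => intro k hk; interval_cases k <;>
      exact ⟨by simp [pvLoopV, pvScanB, List.replicate], by simp [pvLoopV, pvScanB, List.replicate]⟩
  | cons v rest ih =>
    intro k hk
    by_cases h1 : v ≥ 4000
    · have hc : pvCat v = some "radiant" := by simp [pvCat, h1]
      constructor
      · rw [show (List.replicate k (some "radiant") ++ (v :: rest).map pvCat)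
              = List.replicate (k+1) (some "radiant") ++ rest.map pvCat by
            simp [List.replicate_succ', List.append_assoc, hc]]
        by_cases hk2 : k = 2
        · subst hk2
          rw [pvLoopV, if_pos h1, if_pos (by omega)]
          rw [show List.replicate 3 (some "radiant") ++ rest.map pvCat
                = some "radiant" :: some "radiant" :: some "radiant" :: rest.map pvCat by simp [List.replicate]]
          exact (pvScanB_three _ _ (by simp)).symm
        · rw [pvLoopV, if_pos h1, if_neg (by omega)]
          have := (ih (k+1) (by omega)).1
          rwa [show ((k+1 : Nat) : Int) = (k : Int) + 1 by push_cast; ring] at this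
      · rw [pvLoopV, if_pos h1, if_neg (by omega)]
        simp only [zero_add]
        have h0 := (ih 1 (by omega)).1
        simp only [List.replicate, List.singleton_append, Nat.cast_one] at h0
        rw [h0, List.map_cons, hc]
        interval_cases k
        · simp
        · exact (pvScanB_skip1 _ _ _ (by decide)).symm
        · exact (pvScanB_skip2 _ _ _ (by decide)).symm
    · by_cases h2 : v ≤ -4000
      · have hc : pvCat v = some "dire" := by simp [pvCat, h1, h2]
        constructor
        · rw [pvLoopV, if_neg h1, if_pos h2, if_neg (by omega)]
          simp only [zero_add]
          have h0 := (ih 1 (by omega)).2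
          simp only [List.replicate, List.singleton_append, Nat.cast_one] at h0
          rw [h0, List.map_cons, hc]
          interval_cases k
          · simp
          · exact (pvScanB_skip1 _ _ _ (by decide)).symm
          · exact (pvScanB_skip2 _ _ _ (by decide)).symm
        · rw [show (List.replicate k (some "dire") ++ (v :: rest).map pvCat)
                = List.replicate (k+1) (some "dire") ++ rest.map pvCat by
              simp [List.replicate_succ', List.append_assoc, hc]]
          by_cases hk2 : k = 2
          · subst hk2
            rw [pvLoopV, if_neg h1, if_pos h2, if_pos (by omega)]
            rw [show List.replicate 3 (some "dire") ++ rest.map pvCat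
                  = some "dire" :: some "dire" :: some "dire" :: rest.map pvCat by simp [List.replicate]]
            exact (pvScanB_three _ _ (by simp)).symm
          · rw [pvLoopV, if_neg h1, if_pos h2, if_neg (by omega)]
            have := (ih (k+1) (by omega)).2
            rwa [show ((k+1 : Nat) : Int) = (k : Int) + 1 by push_cast; ring] at this
      · have hc : pvCat v = none := by simp [pvCat, h1, h2]
        have h0 := (ih 0 (by omega)).1
        simp only [List.replicate, List.nil_append, Nat.cast_zero] at h0
        have key : ∀ c : Option String, pvScanB (List.replicate k c ++ (v :: rest).map pvCat)
            = pvScanB (rest.map pvCat) := by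
          intro c
          rw [List.map_cons, hc]
          have hnone : pvScanB (none :: rest.map pvCat) = pvScanB (rest.map pvCat) := pvScanB_none _
          interval_cases k
          · simpa using hnone
          · by_cases hcn : c = none
            · subst hcn; simp only [List.replicate, List.singleton_append]
              rw [pvScanB_none, hnone]
            · simp only [List.replicate, List.singleton_append]
              rw [pvScanB_skip1 _ _ _ (Ne.symm hcn), hnone]
          · by_cases hcn : c = none
            · subst hcn; simp only [List.replicate, List.cons_append, List.nil_append]
              rw [pvScanB_none, pvScanB_none, hnone]
            · simp only [List.replicate, List.cons_append, List.nil_append]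
              rw [pvScanB_skip2 _ _ _ (Ne.symm hcn), hnone]
        constructor
        · rw [pvLoopV, if_neg h1, if_neg h2, h0, key]
        · rw [pvLoopV, if_neg h1, if_neg h2, key]
          have h0' := (ih 0 (by omega)).2
          simpa using h0'

-- Bridge: A's index loop over range(a, a+k) equals the value loop over the corresponding window.
theorem pvBridge (leads : List Int) : ∀ (k a : Nat) (cr cd : Int), a + k ≤ leads.length →
    pvLoopA leads (PySem.List.pyRange (a : Int) ((a : Int) + (k : Int)) 1) cr cd
      = pvLoopV ((leads.drop a).take k) cr cd := by
  intro k
  induction k with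
  | zero =>
    intro a cr cd _
    rw [show ((a : Int) + (0 : Nat) : Int) = (a : Int) by push_cast; ring]
    rw [show PySem.List.pyRange (a : Int) (a : Int) 1 = [] by simp [PySem.List.pyRange]]
    rfl
  | succ k ih =>
    intro a cr cd h
    have hlt : a < leads.length := by omega
    rw [PySem.List.pyRange_one_cons (by push_cast; omega)]
    have hget : PySem.List.pyGetD leads (a : Int) 0 = leads[a] := by
      rw [PySem.List.pyGetD_natCast]
      exact List.getD_eq_getElem _ _ hlt
    have hdrop : (leads.drop a).take (k+1) = leads[a] :: (leads.drop (a+1)).take k := by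
      rw [List.drop_eq_getElem_cons hlt, List.take_succ_cons]
    have hrange : (a : Int) + 1 = ((a+1 : Nat) : Int) := by push_cast; ring
    have hb : (a : Int) + ((k+1 : Nat) : Int) = ((a+1 : Nat) : Int) + (k : Nat) := by push_cast; ring
    rw [hdrop, pvLoopA, pvLoopV, hget, hrange, hb]
    split_ifs <;> first | rfl | exact ih (a+1) _ _ (by omega)


-- ===== VERDICT (by name: the statement is the Claim_ definition above) =====
theorem is_early_match_stable4k_3min_spec : Claim_equal_is_early_match_stable4k_3min := by
  intro match_ _
  unfold Spec_is_early_match_stable4k_3min is_early_match_stable4k_3min is_early_match_stable4k_3min_alt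
  set leads := PySem.Dict.getD (⟨match_⟩ : PySem.Dict String (List Int)) "radiantNetworthLeads" [] with hleads
  dsimp only
  by_cases hok : 30 ≤ (leads.length : Int) ∧ (leads.length : Int) ≤ 50
  · rw [if_neg (by omega), if_neg (by omega)]
    have hmin : min (30 : Int) (leads.length : Int) = 30 := min_eq_left (by omega)
    rw [hmin]
    have hslice : PySem.List.slice leads (some 15) (some 30) = (leads.drop 15).take 15 := by
      rw [PySem.List.slice_toNat leads (by norm_num) (by norm_num)]
      rfl
    have hb := pvBridge leads 15 15 0 0 (by omega)
    rw [show ((15 : Nat) : Int) + ((15 : Nat) : Int) = (30 : Int) by norm_num,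
        show ((15 : Nat) : Int) = (15 : Int) by norm_num] at hb
    rw [hb, hslice]
    have := (pvLoopV_eq_scan ((leads.drop 15).take 15) 0 (by omega)).1
    simpa using this
  · rw [if_pos (by omega), if_pos (by omega)]
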